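-- pv_equiv track=rewrite | github.com/jonatanskogsfors/aoc2023 | src/aoc2023/day_10.py | enclosed_tiles
-- ===== SOURCE A (Python) =====
-- def enclosed_tiles(loop: tuple[tuple[int, int]]) -> set[tuple[int, int]]:
--     max_x = max(position[0] for position in loop)
--     min_x = min(position[0] for position in loop)
--     max_y = max(position[1] for position in loop)
--     min_y = min(position[1] for position in loop)
--
--     enclosed = set()
--     for position in [
--         (x, y)
--         for y in range(min_y, max_y + 1)
--         for x in range(min_x, max_x + 1)
--         if (x, y) not in loop
--     ]:
--         if is_inside(position, loop):
--             enclosed.add(position)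
--     return enclosed
--
-- def is_inside(position, loop):
--     rows_in_vertical_line = 3
--     crossings = []
--     y = position[1]
--     local_loop = set()
--     for x, y in [(x, y) for x in reversed(range(position[0]))]:
--         test_position = (x, y)
--         if test_position not in local_loop:
--             if len({position[1] for position in local_loop}) == rows_in_vertical_line:
--                 # We have moved passed a vertical line
--                 crossings.append((x + 1, y))
--             local_loop = set()
--
--         if test_position in loop:
--             loop_index = loop.index(test_position)
--             local_loop.update(get_local_loop(loop, loop_index))
--
--             if len({position[1] for position in local_loop}) == rows_in_vertical_line:
--                 crossings.append(test_position)
--                 local_loop = set()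
--     return len(crossings) % 2 == 1
--
-- def get_local_loop(loop, loop_index) -> set[tuple[int, int]]:
--     previous_index = loop_index - 1
--     next_index = loop_index + 1 if loop_index < len(loop) - 1 else 0
--     local_loop = {
--         position
--         for position in (loop[loop_index], loop[previous_index], loop[next_index])
--     }
--     return local_loop
-- ===== SOURCE B (Python) =====
-- def enclosed_tiles(loop):
--     min_x = min(p[0] for p in loop)
--     max_x = max(p[0] for p in loop)
--     min_y = min(p[1] for p in loop)
--     max_y = max(p[1] for p in loop)
--     loop_set = set(loop)
--     n = len(loop)
--     first_index = {}
--     for i, p in enumerate(loop):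
--         if p not in first_index:
--             first_index[p] = i
--     enclosed = set()
--     for y in range(min_y, max_y + 1):
--         # ONE shared scan of the row, right to left, recording at which step
--         # each crossing is appended; every per-cell ray is a suffix of it.
--         cross = []
--         local = set()
--         for x in range(max_x - 1, -1, -1):
--             tp = (x, y)
--             if tp not in local:
--                 if len({q[1] for q in local}) == 3:
--                     cross.append(x)
--                 local = set()
--             if tp in loop_set:
--                 i = first_index[tp]
--                 local |= {loop[i], loop[i - 1], loop[i + 1 if i < n - 1 else 0]}
--                 if len({q[1] for q in local}) == 3:
--                     cross.append(x)
--                     local = set()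
--         for x in range(min_x, max_x + 1):
--             if (x, y) not in loop_set:
--                 if sum(1 for s in cross if s < x) % 2 == 1:
--                     enclosed.add((x, y))
--     return enclosed
-- ===== Notes on version B (the rewrite author's own statement) =====
-- stated objective: faster
-- what changed: Instead of re-casting a fresh O(W)-long ray (with O(n) loop.index/membership scans at each step) for every candidate cell, B scans each row once right-to-left recording the step positions of all crossings, and decides every cell of the row by counting recorded crossings left of it; this works because A's per-cell ray state is provably a suffix of the shared row scan (the local set always resets to empty at a non-loop cell).
import Mathlib
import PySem

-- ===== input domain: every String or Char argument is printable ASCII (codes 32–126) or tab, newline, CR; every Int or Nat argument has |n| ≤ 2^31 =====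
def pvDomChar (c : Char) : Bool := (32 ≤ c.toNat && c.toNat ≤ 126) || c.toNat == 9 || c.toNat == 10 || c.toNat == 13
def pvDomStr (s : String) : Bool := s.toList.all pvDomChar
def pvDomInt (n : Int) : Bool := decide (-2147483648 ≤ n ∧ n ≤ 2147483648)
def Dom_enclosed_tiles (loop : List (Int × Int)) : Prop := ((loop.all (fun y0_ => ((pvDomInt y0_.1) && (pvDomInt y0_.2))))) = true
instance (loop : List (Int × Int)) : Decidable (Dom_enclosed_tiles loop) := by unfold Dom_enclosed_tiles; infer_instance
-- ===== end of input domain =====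

-- B replaces A's per-cell ray casting (a fresh right-to-left scan with list-membership and
-- loop.index re-scans for every candidate cell) by ONE shared scan per row that records the step
-- positions of all crossings; each cell is then decided by counting recorded crossings left of it.
-- Objective: faster.

-- ===== PORT A =====

-- get_local_loop(loop, loop_index)
def getLocalLoop (loop : List (Int × Int)) (loop_index : Nat) : PySem.Set (Int × Int) :=
  let previous_index : Int := (loop_index : Int) - 1
  let next_index : Int := if (loop_index : Int) < (loop.length : Int) - 1 then (loop_index : Int) + 1 else 0
  PySem.Set.ofList [PySem.List.pyGetD loop (loop_index : Int) (0, 0),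
                    PySem.List.pyGetD loop previous_index (0, 0),
                    PySem.List.pyGetD loop next_index (0, 0)]

-- {position[1] for position in local_loop}
def ysOfSet (s : PySem.Set (Int × Int)) : PySem.Set Int :=
  PySem.Set.ofList (s.map Prod.snd)

-- one iteration of the 'for x, y in …' loop of is_inside; state = (crossings, local_loop)
def isInsideStep (loop : List (Int × Int)) (y : Int)
    (s : List (Int × Int) × PySem.Set (Int × Int)) (x : Int) :
    List (Int × Int) × PySem.Set (Int × Int) :=
  let tp : Int × Int := (x, y)
  let s :=
    if PySem.Set.contains s.2 tp then s
    else
      let crossings := if (ysOfSet s.2).length == 3 then s.1 ++ [(x + 1, y)] else s.1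
      (crossings, (PySem.Set.empty : PySem.Set (Int × Int)))
  -- 'if test_position in loop: loop_index = loop.index(test_position); …'
  match PySem.List.index? loop tp with
  | none => s
  | some loop_index =>
    let local_loop := PySem.Set.update s.2 (getLocalLoop loop loop_index)
    if (ysOfSet local_loop).length == 3 then (s.1 ++ [tp], (PySem.Set.empty : PySem.Set (Int × Int)))
    else (s.1, local_loop)

-- is_inside(position, loop)
def isInside (position : Int × Int) (loop : List (Int × Int)) : Bool :=
  let y := position.2
  let r := ((PySem.List.pyRange 0 position.1 1).reverse).foldl (isInsideStep loop y)
             ([], (PySem.Set.empty : PySem.Set (Int × Int)))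
  r.1.length % 2 == 1

def enclosed_tiles (loop : List (Int × Int)) : List (Int × Int) :=
  match PySem.List.max? (loop.map Prod.fst) (fun v => v),
        PySem.List.min? (loop.map Prod.fst) (fun v => v),
        PySem.List.max? (loop.map Prod.snd) (fun v => v),
        PySem.List.min? (loop.map Prod.snd) (fun v => v) with
  | some max_x, some min_x, some max_y, some min_y =>
    let candidates : List (Int × Int) :=
      (PySem.List.pyRange min_y (max_y + 1) 1).flatMap (fun y =>
        ((PySem.List.pyRange min_x (max_x + 1) 1).filter (fun x => !loop.contains (x, y))).map
          (fun x => (x, y)))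
    candidates.foldl (fun enclosed position =>
        if isInside position loop then PySem.Set.add enclosed position else enclosed)
      (PySem.Set.empty : PySem.Set (Int × Int))
  | _, _, _, _ => []   -- unreachable under Pre_: Python raises ValueError on an empty loop

-- ===== PORT B =====

-- first_index: 'for i, p in enumerate(loop): if p not in first_index: first_index[p] = i'
def firstIndex (loop : List (Int × Int)) : PySem.Dict (Int × Int) Int :=
  (PySem.List.enumerate loop 0).foldl
    (fun d ip => if d.contains ip.2 then d else d.insert ip.2 ip.1) PySem.Dict.empty

-- '{loop[i], loop[i - 1], loop[i + 1 if i < n - 1 else 0]}'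
def tripleB (loop : List (Int × Int)) (n i : Int) : PySem.Set (Int × Int) :=
  PySem.Set.ofList [PySem.List.pyGetD loop i (0, 0),
                    PySem.List.pyGetD loop (i - 1) (0, 0),
                    PySem.List.pyGetD loop (if i < n - 1 then i + 1 else 0) (0, 0)]

-- '{q[1] for q in local}'
def rowsB (s : PySem.Set (Int × Int)) : PySem.Set Int := PySem.Set.ofList (s.map Prod.snd)

-- one step of the shared row scan; state = (recorded crossing step positions, local)
def rowStep (loopSet : PySem.Set (Int × Int)) (fi : PySem.Dict (Int × Int) Int)
    (loop : List (Int × Int)) (n y : Int)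
    (s : List Int × PySem.Set (Int × Int)) (x : Int) : List Int × PySem.Set (Int × Int) :=
  let tp : Int × Int := (x, y)
  let s :=
    if PySem.Set.contains s.2 tp then s
    else ((if (rowsB s.2).length == 3 then s.1 ++ [x] else s.1),
          (PySem.Set.empty : PySem.Set (Int × Int)))
  if PySem.Set.contains loopSet tp then
    match fi.get? tp with
    | none => s   -- unreachable: loopSet holds exactly the keys of fi
    | some i =>
      let loc := PySem.Set.update s.2 (tripleB loop n i)
      if (rowsB loc).length == 3 then (s.1 ++ [x], (PySem.Set.empty : PySem.Set (Int × Int)))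
      else (s.1, loc)
  else s

-- the shared scan of row y: 'for x in range(max_x - 1, -1, -1): …', returning cross
def rowScan (loopSet : PySem.Set (Int × Int)) (fi : PySem.Dict (Int × Int) Int)
    (loop : List (Int × Int)) (n y max_x : Int) : List Int :=
  ((PySem.List.pyRange (max_x - 1) (-1) (-1)).foldl (rowStep loopSet fi loop n y)
    ([], (PySem.Set.empty : PySem.Set (Int × Int)))).1

def enclosed_tiles_alt (loop : List (Int × Int)) : List (Int × Int) :=
  match PySem.List.min? (loop.map Prod.fst) (fun v => v) with
  | none => []
  | some min_x =>
  match PySem.List.max? (loop.map Prod.fst) (fun v => v) with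
  | none => []
  | some max_x =>
  match PySem.List.min? (loop.map Prod.snd) (fun v => v) with
  | none => []
  | some min_y =>
  match PySem.List.max? (loop.map Prod.snd) (fun v => v) with
  | none => []
  | some max_y =>
    let loopSet : PySem.Set (Int × Int) := PySem.Set.ofList loop
    let fi := firstIndex loop
    (PySem.List.pyRange min_y (max_y + 1) 1).foldl (fun enclosed y =>
      let cross := rowScan loopSet fi loop (loop.length : Int) y max_x
      (PySem.List.pyRange min_x (max_x + 1) 1).foldl (fun enclosed x =>
        if PySem.Set.contains loopSet (x, y) then enclosed
        else if PySem.Int.mod (cross.foldl (fun a s => if s < x then a + 1 else a) 0) 2 == 1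
             then PySem.Set.add enclosed (x, y) else enclosed) enclosed)
      (PySem.Set.empty : PySem.Set (Int × Int))

-- ===== PRECONDITION & SPEC =====
-- Pre_ excludes only the empty loop, on which the Python A (and B) raises ValueError in max()/min().
def Pre_enclosed_tiles (loop : List (Int × Int)) : Prop := loop ≠ []
instance (loop : List (Int × Int)) : Decidable (Pre_enclosed_tiles loop) := by
  unfold Pre_enclosed_tiles; infer_instance

def pvWitness_enclosed_tiles : (List (Int × Int)) := [(0, 0), (1, 0), (1, 1), (0, 1)]

def Spec_enclosed_tiles (loop : List (Int × Int)) (out : List (Int × Int)) : Prop := out = enclosed_tiles_alt loop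
instance (loop : List (Int × Int)) (out : List (Int × Int)) : Decidable (Spec_enclosed_tiles loop out) := by unfold Spec_enclosed_tiles; infer_instance

-- ===== CLAIM (what is proved, stated in full; the proofs are below) =====
def Claim_equal_enclosed_tiles : Prop := ∀ (loop : List (Int × Int)), Dom_enclosed_tiles loop → Pre_enclosed_tiles loop → Spec_enclosed_tiles loop (enclosed_tiles loop)

-- ===== LEMMAS AND PROOFS =====

theorem setContains_ofList (l : List (Int × Int)) (z : Int × Int) :
    (PySem.Set.ofList l).contains z = l.contains z := by
  rcases hb : l.contains z with _ | _
  · rcases hc : (PySem.Set.ofList l).contains z with _ | _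
    · rfl
    · have := (PySem.Set.contains_iff _ _).mp hc
      rw [PySem.Set.mem_ofList] at this
      simp_all
  · exact (PySem.Set.contains_iff _ _).mpr ((PySem.Set.mem_ofList _ _).mpr (by simpa using hb))

-- getLocalLoop and tripleB compute the same neighbour triple
theorem triple_eq (loop : List (Int × Int)) (i : Nat) :
    getLocalLoop loop i = tripleB loop (loop.length : Int) (Int.ofNat i) := rfl

-- the first-index dict looks up exactly loop.index
theorem firstIndex_get? (loop : List (Int × Int)) :
    ∀ tp, (firstIndex loop).get? tp = (PySem.List.index? loop tp).map Int.ofNat := by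
  induction loop using List.reverseRecOn with
  | nil =>
    intro tp
    have h : PySem.List.index? ([] : List (Int × Int)) tp = none :=
      (PySem.List.index?_eq_none_iff _ _).mpr (by simp)
    rw [h]
    simp [firstIndex, PySem.List.enumerate, PySem.Dict.get?_empty]
  | append_singleton xs a ih =>
    intro tp
    have hsing : ∀ c : Int, PySem.List.enumerate [a] c = [(c, a)] := fun _ => rfl
    have hfi : firstIndex (xs ++ [a]) =
        (if (firstIndex xs).contains a then firstIndex xs
         else (firstIndex xs).insert a ((0 : Int) + (xs.length : Int))) := by
      unfold firstIndex
      rw [PySem.List.enumerate_append, List.foldl_append, hsing, List.foldl_cons, List.foldl_nil]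
    rw [hfi]
    by_cases ha : a ∈ xs
    · have hc : (firstIndex xs).contains a = true := by
        rw [PySem.Dict.contains_eq_isSome_get?, ih a]
        rcases h : PySem.List.index? xs a with _ | i
        · exact absurd ha ((PySem.List.index?_eq_none_iff _ _).mp h)
        · rfl
      rw [if_pos hc, ih tp]
      by_cases htp : tp ∈ xs
      · rw [PySem.List.index?_append_of_mem _ htp]
      · have h1 : PySem.List.index? xs tp = none := (PySem.List.index?_eq_none_iff _ _).mpr htp
        have h2 : PySem.List.index? (xs ++ [a]) tp = none := by
          refine (PySem.List.index?_eq_none_iff _ _).mpr ?_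
          intro hmem
          rcases List.mem_append.mp hmem with h | h
          · exact htp h
          · rw [List.mem_singleton] at h; subst h; exact htp ha
        rw [h1, h2]
    · have hc : (firstIndex xs).contains a = false := by
        rw [PySem.Dict.contains_eq_isSome_get?, ih a,
            (PySem.List.index?_eq_none_iff _ _).mpr ha]
        rfl
      rw [if_neg (by simp [hc]), PySem.Dict.get?_insert]
      by_cases htp : tp = a
      · subst htp
        rw [if_pos rfl, PySem.List.index?_append_singleton_self xs tp ha]
        simp
      · rw [if_neg htp, ih tp]
        by_cases hmem : tp ∈ xs
        · rw [PySem.List.index?_append_of_mem _ hmem]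
        · have h1 : PySem.List.index? xs tp = none := (PySem.List.index?_eq_none_iff _ _).mpr hmem
          have h2 : PySem.List.index? (xs ++ [a]) tp = none := by
            refine (PySem.List.index?_eq_none_iff _ _).mpr ?_
            intro hm
            rcases List.mem_append.mp hm with h | h
            · exact hmem h
            · rw [List.mem_singleton] at h; exact htp h
          rw [h1, h2]

-- the simulation relation between A's per-cell scan state and B's shared scan state
def RelAB (a : List (Int × Int) × PySem.Set (Int × Int))
    (b : List Int × PySem.Set (Int × Int)) : Prop :=
  a.2 = b.2 ∧ a.1.length = b.1.length

theorem stepAB (loop : List (Int × Int)) (y x : Int) (al : List (Int × Int))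
    (bl : List Int) (sc : PySem.Set (Int × Int)) (h1 : al.length = bl.length) :
    RelAB (isInsideStep loop y (al, sc) x)
      (rowStep (PySem.Set.ofList loop) (firstIndex loop) loop (loop.length : Int) y (bl, sc) x) := by
  have hbody :
      rowStep (PySem.Set.ofList loop) (firstIndex loop) loop (loop.length : Int) y (bl, sc) x =
      (let s := if PySem.Set.contains sc (x, y) then (bl, sc)
                else ((if (ysOfSet sc).length == 3 then bl ++ [x] else bl),
                      (PySem.Set.empty : PySem.Set (Int × Int)))
       if PySem.Set.contains (PySem.Set.ofList loop) (x, y) then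
         match (firstIndex loop).get? (x, y) with
         | none => s
         | some i =>
           if (ysOfSet (PySem.Set.update s.2 (tripleB loop (loop.length : Int) i))).length == 3 then
             (s.1 ++ [x], (PySem.Set.empty : PySem.Set (Int × Int)))
           else (s.1, PySem.Set.update s.2 (tripleB loop (loop.length : Int) i))
       else s) := rfl
  have habody : isInsideStep loop y (al, sc) x =
      (let s := if PySem.Set.contains sc (x, y) then (al, sc)
                else ((if (ysOfSet sc).length == 3 then al ++ [(x + 1, y)] else al),
                      (PySem.Set.empty : PySem.Set (Int × Int)))
       match PySem.List.index? loop (x, y) with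
       | none => s
       | some i =>
         if (ysOfSet (PySem.Set.update s.2 (getLocalLoop loop i))).length == 3 then
           (s.1 ++ [(x, y)], (PySem.Set.empty : PySem.Set (Int × Int)))
         else (s.1, PySem.Set.update s.2 (getLocalLoop loop i))) := rfl
  rw [hbody, habody, firstIndex_get?, setContains_ofList]
  have cont : ∀ (cr : List (Int × Int)) (st : List Int) (l1 : PySem.Set (Int × Int)),
      cr.length = st.length →
      RelAB
        (match PySem.List.index? loop (x, y) with
         | none => (cr, l1)
         | some i =>
           if (ysOfSet (PySem.Set.update l1 (getLocalLoop loop i))).length == 3 then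
             (cr ++ [(x, y)], (PySem.Set.empty : PySem.Set (Int × Int)))
           else (cr, PySem.Set.update l1 (getLocalLoop loop i)))
        (if loop.contains (x, y) then
           match (PySem.List.index? loop (x, y)).map Int.ofNat with
           | none => (st, l1)
           | some i =>
             if (ysOfSet (PySem.Set.update l1 (tripleB loop (loop.length : Int) i))).length == 3 then
               (st ++ [x], (PySem.Set.empty : PySem.Set (Int × Int)))
             else (st, PySem.Set.update l1 (tripleB loop (loop.length : Int) i))
         else (st, l1)) := by
    intro cr st l1 hlen
    rcases hI : PySem.List.index? loop (x, y) with _ | i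
    · have hnc : loop.contains (x, y) = false := by
        simpa using (PySem.List.index?_eq_none_iff _ _).mp hI
      rw [hnc]
      simp only [Option.map_none, Bool.false_eq_true, if_false]
      exact ⟨rfl, hlen⟩
    · have hmem : (x, y) ∈ loop := by
        have h := PySem.List.index?_isSome_iff loop (x, y)
        rw [hI] at h
        exact h.mp rfl
      have hcc : loop.contains (x, y) = true := by simpa using hmem
      rw [hcc]
      simp only [Option.map_some, if_true]
      rw [← triple_eq]
      by_cases h3 : ((ysOfSet (PySem.Set.update l1 (getLocalLoop loop i))).length == 3) = true
      · simp only [h3, if_true]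
        exact ⟨rfl, by simp [hlen]⟩
      · simp only [h3, if_false, Bool.false_eq_true]
        exact ⟨rfl, hlen⟩
  by_cases hcl : PySem.Set.contains sc (x, y) = true
  · simp only [hcl, if_true]
    exact cont al bl sc h1
  · simp only [hcl, if_false, Bool.false_eq_true]
    by_cases h3 : ((ysOfSet sc).length == 3) = true
    · simp only [h3, if_true]
      exact cont (al ++ [(x + 1, y)]) (bl ++ [x]) PySem.Set.empty (by simp [h1])
    · simp only [h3, if_false, Bool.false_eq_true]
      exact cont al bl PySem.Set.empty h1

theorem foldAB (loop : List (Int × Int)) (y : Int) (L : List Int)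
    (a : List (Int × Int) × PySem.Set (Int × Int)) (b : List Int × PySem.Set (Int × Int))
    (h : RelAB a b) :
    RelAB (L.foldl (isInsideStep loop y) a)
      (L.foldl (rowStep (PySem.Set.ofList loop) (firstIndex loop) loop (loop.length : Int) y) b) := by
  induction L generalizing a b with
  | nil => exact h
  | cons x L ih =>
    refine ih _ _ ?_
    obtain ⟨h2, h1⟩ := h
    rcases a with ⟨al, as2⟩
    rcases b with ⟨bl, bs2⟩
    simp only [] at h2 h1
    subst h2
    exact stepAB loop y x al bl as2 h1

-- the recorded-steps accumulator of the shared scan is append-only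
theorem rowStep_shift (loopSet : PySem.Set (Int × Int)) (fi : PySem.Dict (Int × Int) Int)
    (loop : List (Int × Int)) (n y : Int) (st : List Int) (loc : PySem.Set (Int × Int)) (x : Int) :
    rowStep loopSet fi loop n y (st, loc) x =
      (st ++ (rowStep loopSet fi loop n y ([], loc) x).1,
       (rowStep loopSet fi loop n y ([], loc) x).2) := by
  rcases h4 : fi.get? (x, y) with _ | i <;>
    simp only [rowStep, h4] <;> split_ifs <;> simp

theorem fold_shift (loopSet : PySem.Set (Int × Int)) (fi : PySem.Dict (Int × Int) Int)
    (loop : List (Int × Int)) (n y : Int) (L : List Int) :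
    ∀ (st : List Int) (loc : PySem.Set (Int × Int)),
    L.foldl (rowStep loopSet fi loop n y) (st, loc) =
      (st ++ (L.foldl (rowStep loopSet fi loop n y) ([], loc)).1,
       (L.foldl (rowStep loopSet fi loop n y) ([], loc)).2) := by
  induction L with
  | nil => intro st loc; simp
  | cons x L ih =>
    intro st loc
    simp only [List.foldl_cons]
    rw [rowStep_shift]
    rcases hg : rowStep loopSet fi loop n y ([], loc) x with ⟨e, loc'⟩
    rw [ih (st ++ e) loc', ih e loc', List.append_assoc]

theorem rowStep_nil_sub (loopSet : PySem.Set (Int × Int)) (fi : PySem.Dict (Int × Int) Int)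
    (loop : List (Int × Int)) (n y : Int) (loc : PySem.Set (Int × Int)) (x : Int) :
    ∀ v ∈ (rowStep loopSet fi loop n y ([], loc) x).1, v = x := by
  rcases h4 : fi.get? (x, y) with _ | i <;>
    simp only [rowStep, h4] <;> split_ifs <;> intro v hv <;> simp at hv <;> tauto

theorem rowStep_mem (loopSet : PySem.Set (Int × Int)) (fi : PySem.Dict (Int × Int) Int)
    (loop : List (Int × Int)) (n y : Int) (st : List Int) (loc : PySem.Set (Int × Int)) (x v : Int)
    (hv : v ∈ (rowStep loopSet fi loop n y (st, loc) x).1) : v ∈ st ∨ v = x := by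
  rw [rowStep_shift] at hv
  have hv' : v ∈ st ++ (rowStep loopSet fi loop n y ([], loc) x).1 := hv
  rcases List.mem_append.mp hv' with h | h
  · exact Or.inl h
  · exact Or.inr (rowStep_nil_sub loopSet fi loop n y loc x v h)

theorem fold_mem (loopSet : PySem.Set (Int × Int)) (fi : PySem.Dict (Int × Int) Int)
    (loop : List (Int × Int)) (n y : Int) (L : List Int) :
    ∀ (st : List Int) (loc : PySem.Set (Int × Int)) (v : Int),
    v ∈ (L.foldl (rowStep loopSet fi loop n y) (st, loc)).1 → v ∈ st ∨ v ∈ L := by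
  induction L with
  | nil => intro st loc v hv; exact Or.inl hv
  | cons x L ih =>
    intro st loc v hv
    simp only [List.foldl_cons] at hv
    rcases hg : rowStep loopSet fi loop n y (st, loc) x with ⟨st', loc'⟩
    rw [hg] at hv
    rcases ih st' loc' v hv with h | h
    · rcases rowStep_mem loopSet fi loop n y st loc x v (by rw [hg]; exact h) with h' | h'
      · exact Or.inl h'
      · exact Or.inr (by simp [h'])
    · exact Or.inr (List.mem_cons_of_mem _ h)

-- where the local set can go in one step
theorem rowStep_snd (loopSet : PySem.Set (Int × Int)) (fi : PySem.Dict (Int × Int) Int)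
    (loop : List (Int × Int)) (n y : Int) (st : List Int) (loc : PySem.Set (Int × Int)) (x : Int) :
    (rowStep loopSet fi loop n y (st, loc) x).2 = loc ∨
    (rowStep loopSet fi loop n y (st, loc) x).2 = (PySem.Set.empty : PySem.Set (Int × Int)) ∨
    (∃ i, fi.get? (x, y) = some i ∧
      ((rowStep loopSet fi loop n y (st, loc) x).2 = PySem.Set.update loc (tripleB loop n i) ∨
       (rowStep loopSet fi loop n y (st, loc) x).2 =
         PySem.Set.update (PySem.Set.empty : PySem.Set (Int × Int)) (tripleB loop n i))) := by
  rcases h4 : fi.get? (x, y) with _ | i <;>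
    simp only [rowStep, h4] <;> split_ifs <;> simp [PySem.Set.empty]

-- the neighbour triple only holds loop cells
theorem triple_mem (loop : List (Int × Int)) (i : Nat) (hi : i < loop.length) :
    ∀ q ∈ tripleB loop (loop.length : Int) (Int.ofNat i), q ∈ loop := by
  intro q hq
  rw [tripleB, PySem.Set.mem_ofList] at hq
  simp only [List.mem_cons, List.not_mem_nil, or_false] at hq
  have hcast : Int.ofNat i = (i : Int) := rfl
  rw [hcast] at hq
  rcases hq with rfl | rfl | rfl
  · exact PySem.List.pyGetD_mem _ _ ⟨by omega, by omega⟩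
  · exact PySem.List.pyGetD_mem _ _ ⟨by omega, by omega⟩
  · refine PySem.List.pyGetD_mem _ _ ?_
    split_ifs with hcase
    · exact ⟨by omega, by omega⟩
    · exact ⟨by omega, by omega⟩

theorem rowStep_loc (loop : List (Int × Int)) (y : Int) (st : List Int)
    (loc : PySem.Set (Int × Int)) (x : Int) (hloc : ∀ q ∈ loc, q ∈ loop) :
    ∀ q ∈ (rowStep (PySem.Set.ofList loop) (firstIndex loop) loop (loop.length : Int) y (st, loc) x).2,
      q ∈ loop := by
  intro q hq
  rcases rowStep_snd (PySem.Set.ofList loop) (firstIndex loop) loop (loop.length : Int) y st loc x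
    with h | h | ⟨i, hi, h | h⟩
  · rw [h] at hq; exact hloc q hq
  · rw [h] at hq; simp [PySem.Set.empty] at hq
  · rw [h] at hq
    rw [firstIndex_get? loop (x, y)] at hi
    rcases hI : PySem.List.index? loop (x, y) with _ | i0 <;> rw [hI] at hi
    · simp at hi
    · simp only [Option.map_some, Option.some.injEq] at hi
      subst hi
      obtain ⟨hilt, -, -⟩ := PySem.List.getElem_of_index?_eq_some hI
      rcases (PySem.Set.mem_update _ _ _).mp hq with h' | h'
      · exact hloc q h'
      · exact triple_mem loop i0 hilt q h'
  · rw [h] at hq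
    rw [firstIndex_get? loop (x, y)] at hi
    rcases hI : PySem.List.index? loop (x, y) with _ | i0 <;> rw [hI] at hi
    · simp at hi
    · simp only [Option.map_some, Option.some.injEq] at hi
      subst hi
      obtain ⟨hilt, -, -⟩ := PySem.List.getElem_of_index?_eq_some hI
      rcases (PySem.Set.mem_update _ _ _).mp hq with h' | h'
      · simp [PySem.Set.empty] at h'
      · exact triple_mem loop i0 hilt q h'

theorem fold_loc (loop : List (Int × Int)) (y : Int) (L : List Int) :
    ∀ (st : List Int) (loc : PySem.Set (Int × Int)), (∀ q ∈ loc, q ∈ loop) →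
    ∀ q ∈ (L.foldl (rowStep (PySem.Set.ofList loop) (firstIndex loop) loop (loop.length : Int) y) (st, loc)).2,
      q ∈ loop := by
  induction L with
  | nil => intro st loc hloc q hq; exact hloc q hq
  | cons x L ih =>
    intro st loc hloc q hq
    simp only [List.foldl_cons] at hq
    rcases hg : rowStep (PySem.Set.ofList loop) (firstIndex loop) loop (loop.length : Int) y (st, loc) x
      with ⟨st', loc'⟩
    rw [hg] at hq
    exact ih st' loc' (fun p hp => rowStep_loc loop y st loc x hloc p (by rw [hg]; exact hp)) q hq

-- a scan step at a non-loop cell always leaves the local set empty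
theorem rowStep_reset (loop : List (Int × Int)) (y : Int) (st : List Int)
    (loc : PySem.Set (Int × Int)) (x : Int) (hnot : (x, y) ∉ loop)
    (hloc : ∀ q ∈ loc, q ∈ loop) :
    (rowStep (PySem.Set.ofList loop) (firstIndex loop) loop (loop.length : Int) y (st, loc) x).2 =
      (PySem.Set.empty : PySem.Set (Int × Int)) := by
  have h1 : (x, y) ∉ loc := fun h => hnot (hloc _ h)
  simp [rowStep, h1, hnot, PySem.Set.empty]

-- parity bridge: Python's '% 2 == 1' on the Int count vs the Nat length
theorem parity_bridge (k : Nat) :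
    ((PySem.Int.mod ((0 : Int) + (k : Int)) 2) == 1) = (k % 2 == 1) := by
  rw [PySem.Int.mod_eq_emod_of_pos (by norm_num)]
  rcases Nat.mod_two_eq_zero_or_one k with h | h
  · have h2 : ((0 : Int) + (k : Int)) % 2 = 0 := by omega
    rw [h2, h]
    decide
  · have h2 : ((0 : Int) + (k : Int)) % 2 = 1 := by omega
    rw [h2, h]
    decide

-- the per-cell equality: A's fresh ray equals counting the shared scan's crossings left of the cell
theorem cell_eq (loop : List (Int × Int)) (y x0 max_x : Int)
    (hx : x0 ≤ max_x) (hnot : (x0, y) ∉ loop) :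
    isInside (x0, y) loop =
      (PySem.Int.mod
        ((rowScan (PySem.Set.ofList loop) (firstIndex loop) loop (loop.length : Int) y max_x).foldl
          (fun a s => if s < x0 then a + 1 else a) 0) 2 == 1) := by
  rw [PySem.List.foldl_ite_add_one (fun s => s < x0), parity_bridge]
  unfold isInside rowScan
  dsimp only
  suffices h :
      (((PySem.List.pyRange 0 x0 1).reverse).foldl (isInsideStep loop y)
        ([], (PySem.Set.empty : PySem.Set (Int × Int)))).1.length =
      List.countP (fun s => decide (s < x0))
        (((PySem.List.pyRange (max_x - 1) (-1) (-1)).foldl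
          (rowStep (PySem.Set.ofList loop) (firstIndex loop) loop (loop.length : Int) y)
          ([], (PySem.Set.empty : PySem.Set (Int × Int)))).1) by
    rw [h]
  by_cases hx0 : x0 ≤ 0
  · rw [PySem.List.pyRange_one_eq_nil hx0]
    simp only [List.reverse_nil, List.foldl_nil, List.length_nil]
    symm
    rw [List.countP_eq_zero]
    intro v hv
    rcases fold_mem (PySem.Set.ofList loop) (firstIndex loop) loop (loop.length : Int) y
        (PySem.List.pyRange (max_x - 1) (-1) (-1)) [] _ v hv with h | h
    · simp at h
    · rw [PySem.List.mem_pyRange_neg_one] at h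
      simp only [decide_eq_true_eq]
      omega
  · have hx0' : (0 : Int) < x0 := by omega
    have hsplit : PySem.List.pyRange (max_x - 1) (-1) (-1) =
        (PySem.List.pyRange x0 max_x 1).reverse ++ (PySem.List.pyRange 0 x0 1).reverse := by
      rw [PySem.List.pyRange_neg_one_eq_reverse,
          show max_x - 1 + 1 = max_x by ring, show (-1 : Int) + 1 = 0 by ring,
          PySem.List.pyRange_one_append 0 x0 max_x (by omega) hx, List.reverse_append]
    rw [hsplit, List.foldl_append]
    have hs1loc :
        (((PySem.List.pyRange x0 max_x 1).reverse).foldl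
          (rowStep (PySem.Set.ofList loop) (firstIndex loop) loop (loop.length : Int) y)
          ([], (PySem.Set.empty : PySem.Set (Int × Int)))).2 =
        (PySem.Set.empty : PySem.Set (Int × Int)) := by
      rcases eq_or_lt_of_le hx with heq | hlt
      · rw [← heq, PySem.List.pyRange_one_eq_nil (le_refl x0)]
        rfl
      · rw [PySem.List.pyRange_one_cons hlt, List.reverse_cons, List.foldl_append,
            List.foldl_cons, List.foldl_nil]
        rcases hmid : ((PySem.List.pyRange (x0 + 1) max_x 1).reverse).foldl
            (rowStep (PySem.Set.ofList loop) (firstIndex loop) loop (loop.length : Int) y)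
            ([], (PySem.Set.empty : PySem.Set (Int × Int))) with ⟨stm, locm⟩
        refine rowStep_reset loop y stm locm x0 hnot ?_
        intro q hq
        refine fold_loc loop y ((PySem.List.pyRange (x0 + 1) max_x 1).reverse) []
          (PySem.Set.empty : PySem.Set (Int × Int))
          (fun p hp => by simp [PySem.Set.empty] at hp) q ?_
        rw [hmid]
        exact hq
    rcases hs1 : ((PySem.List.pyRange x0 max_x 1).reverse).foldl
        (rowStep (PySem.Set.ofList loop) (firstIndex loop) loop (loop.length : Int) y)
        ([], (PySem.Set.empty : PySem.Set (Int × Int))) with ⟨st1, loc1⟩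
    rw [hs1] at hs1loc
    simp only [] at hs1loc
    subst hs1loc
    rw [fold_shift]
    dsimp only
    rw [List.countP_append]
    have hc1 : st1.countP (fun s => decide (s < x0)) = 0 := by
      rw [List.countP_eq_zero]
      intro v hv
      rcases fold_mem (PySem.Set.ofList loop) (firstIndex loop) loop (loop.length : Int) y
          ((PySem.List.pyRange x0 max_x 1).reverse) [] _ v (by rw [hs1]; exact hv) with h | h
      · simp at h
      · rw [List.mem_reverse, PySem.List.mem_pyRange_one] at h
        simp only [decide_eq_true_eq]
        omega
    have hc2 : (((PySem.List.pyRange 0 x0 1).reverse).foldl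
          (rowStep (PySem.Set.ofList loop) (firstIndex loop) loop (loop.length : Int) y)
          ([], (PySem.Set.empty : PySem.Set (Int × Int)))).1.countP (fun s => decide (s < x0)) =
        (((PySem.List.pyRange 0 x0 1).reverse).foldl
          (rowStep (PySem.Set.ofList loop) (firstIndex loop) loop (loop.length : Int) y)
          ([], (PySem.Set.empty : PySem.Set (Int × Int)))).1.length := by
      rw [List.countP_eq_length]
      intro v hv
      rcases fold_mem (PySem.Set.ofList loop) (firstIndex loop) loop (loop.length : Int) y
          ((PySem.List.pyRange 0 x0 1).reverse) [] _ v hv with h | h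
      · simp at h
      · rw [List.mem_reverse, PySem.List.mem_pyRange_one] at h
        simp only [decide_eq_true_eq]
        omega
    rw [hc1, hc2, Nat.zero_add]
    exact (foldAB loop y ((PySem.List.pyRange 0 x0 1).reverse)
      ([], (PySem.Set.empty : PySem.Set (Int × Int)))
      ([], (PySem.Set.empty : PySem.Set (Int × Int))) ⟨rfl, rfl⟩).2

-- ===== VERDICT (by name: the statement is the Claim_ definition above) =====
theorem enclosed_tiles_spec : Claim_equal_enclosed_tiles := by
  intro loop _ hpre
  unfold Spec_enclosed_tiles enclosed_tiles enclosed_tiles_alt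
  have hmapf : loop.map Prod.fst ≠ [] := by simpa using hpre
  have hmaps : loop.map Prod.snd ≠ [] := by simpa using hpre
  rcases h1 : PySem.List.max? (loop.map Prod.fst) (fun v => v) with _ | max_x
  · exact absurd ((PySem.List.max?_eq_none_iff _ _).mp h1) hmapf
  rcases h2 : PySem.List.min? (loop.map Prod.fst) (fun v => v) with _ | min_x
  · exact absurd ((PySem.List.min?_eq_none_iff _ _).mp h2) hmapf
  rcases h3 : PySem.List.max? (loop.map Prod.snd) (fun v => v) with _ | max_y
  · exact absurd ((PySem.List.max?_eq_none_iff _ _).mp h3) hmaps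
  rcases h4 : PySem.List.min? (loop.map Prod.snd) (fun v => v) with _ | min_y
  · exact absurd ((PySem.List.min?_eq_none_iff _ _).mp h4) hmaps
  simp only []
  rw [List.foldl_flatMap]
  apply PySem.List.foldl_congr_mem
  intro acc y _
  rw [List.foldl_map, ← PySem.List.foldl_if_eq_foldl_filter]
  apply PySem.List.foldl_congr_mem
  intro acc2 x hx
  rw [setContains_ofList]
  rcases hc : loop.contains (x, y) with _ | _
  · have hxle : x ≤ max_x := by
      rw [PySem.List.mem_pyRange_one] at hx
      omega

    rw [cell_eq loop y x max_x hxle (by simpa using hc)]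
    simp
  · simp
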